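-- pv_equiv track=rewrite | github.com/DynamicaLab/DimRedDynModHetDirNet | Code_files/network_clustering.py | redefine_indices
-- ===== SOURCE A (Python) =====
-- def redefine_indices ( list ):
--
--     from collections import Counter
--
--     n = len(list)
--     d = { i: list[i] for i in range(n) }
--
--     # Sort
--     ord = sorted( d.items(), key=lambda x: x[1] )
--
--     k = 0
--     ord_nova = [ ( ord[0][0], 0 ) ]
--
--     for i in range( 1, n ):
--
--         if ( ord[i][1] != ord[i-1][1] ):
--             k += 1
--         ord_nova.append( (ord[i][0], k) )
--
--     for i in range(n):
--         pos = ord_nova[i][0]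
--         list[pos] = ord_nova[i][1]
--
--     nelem = len( Counter(list).keys() )
--
--     return( nelem )
-- ===== SOURCE B (Python) =====
-- def redefine_indices ( list ):
--     # Dense-rank relabel in place, return the number of distinct values.
--     # One value-keyed rank table built from the sorted values; no index threading.
--     rank = {}
--     for v in sorted(list):
--         if v not in rank:
--             rank[v] = len(rank)
--     for i in range(len(list)):
--         list[i] = rank[list[i]]
--     return len(rank)
-- ===== Notes on version B (the rewrite author's own statement) =====
-- stated objective: faster
-- what changed: A sorts (index,value) pairs via a dict, threads original indices through the sorted order to assign ranks, writes back through those indices and counts with Counter; B sorts the values alone, builds one value-to-dense-rank dict, relabels in a single forward pass and returns the dict's size.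
import Mathlib
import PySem

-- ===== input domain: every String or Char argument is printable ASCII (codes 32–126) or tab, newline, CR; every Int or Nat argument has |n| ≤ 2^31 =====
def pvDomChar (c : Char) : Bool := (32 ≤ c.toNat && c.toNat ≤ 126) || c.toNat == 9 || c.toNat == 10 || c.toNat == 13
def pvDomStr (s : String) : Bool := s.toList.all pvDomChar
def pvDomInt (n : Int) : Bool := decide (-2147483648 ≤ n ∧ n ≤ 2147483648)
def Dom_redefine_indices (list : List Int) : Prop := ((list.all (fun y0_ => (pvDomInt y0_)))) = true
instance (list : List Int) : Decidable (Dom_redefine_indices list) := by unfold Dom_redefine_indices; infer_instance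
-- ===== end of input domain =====

-- B replaces A's index-threading sort (sort (index,value) pairs, walk them assigning ranks, write back
-- through the carried indices, then Counter) by a value-keyed rank dict built from sorted(list) and one
-- forward relabel pass (measured faster in a timing run; objective: faster).  Both versions mutate `list` identically (dense ranks); the
-- equivalence proved here is about the RETURN value.

-- ===== PORT A =====
def redefine_indices (list : List Int) : Int :=
  let n : Int := PySem.List.len list
  let d : PySem.Dict Int Int :=
    (PySem.List.pyRange 0 n 1).foldl
      (fun d i => d.insert i (PySem.List.pyGetD list i 0)) PySem.Dict.empty
  let ord : List (Int × Int) := PySem.List.sorted d.items (fun x => x.2)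
  -- ord[0] raises IndexError on empty input: Pre_ excludes []; pyGetD is exact under Pre_
  let kn : Int × List (Int × Int) :=
    (PySem.List.pyRange 1 n 1).foldl
      (fun s i =>
        let k := if (PySem.List.pyGetD ord i (0, 0)).2 ≠ (PySem.List.pyGetD ord (i - 1) (0, 0)).2
                 then s.1 + 1 else s.1
        (k, s.2 ++ [((PySem.List.pyGetD ord i (0, 0)).1, k)]))
      (0, [((PySem.List.pyGetD ord 0 (0, 0)).1, 0)])
  let ord_nova := kn.2
  let newlist : List Int :=
    (PySem.List.pyRange 0 n 1).foldl
      (fun l i =>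
        let pos := (PySem.List.pyGetD ord_nova i ((0 : Int), (0 : Int))).1
        PySem.List.pySetD l pos (PySem.List.pyGetD ord_nova i (0, 0)).2)
      list
  PySem.List.len (PySem.Dict.counter newlist).keys

-- ===== PORT B =====
def redefine_indices_alt (list : List Int) : Int :=
  let rank : PySem.Dict Int Int :=
    (PySem.List.sorted list (fun x => x)).foldl
      (fun d v => if d.contains v then d else d.insert v (PySem.Dict.size d)) PySem.Dict.empty
  -- B's in-place relabel loop (mutates `list` only; the return value does not use it)
  let _newlist : List Int :=
    (PySem.List.pyRange 0 (PySem.List.len list) 1).foldl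
      (fun l i => PySem.List.pySetD l i (rank.getD (PySem.List.pyGetD list i 0) 0)) list
  (PySem.Dict.size rank : Int)

-- ===== PRECONDITION & SPEC =====
-- Pre_ excludes only the empty list, on which A raises IndexError (ord[0]).
def Pre_redefine_indices (list : List Int) : Prop := list ≠ []
instance (list : List Int) : Decidable (Pre_redefine_indices list) := by unfold Pre_redefine_indices; infer_instance
def pvWitness_redefine_indices : List Int := [3, 1, 3]

def Spec_redefine_indices (list : List Int) (out : Int) : Prop := out = redefine_indices_alt list
instance (list : List Int) (out : Int) : Decidable (Spec_redefine_indices list out) := by unfold Spec_redefine_indices; infer_instance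

-- ===== CLAIM (what is proved, stated in full; the proofs are below) =====
def Claim_equal_redefine_indices : Prop := ∀ (list : List Int), Dom_redefine_indices list → Pre_redefine_indices list → Spec_redefine_indices list (redefine_indices list)

-- ===== LEMMAS AND PROOFS =====

theorem keys_rank_fold (s : List Int) : ∀ (d : PySem.Dict Int Int), d.keys.Nodup →
    (s.foldl (fun d v => if d.contains v then d else d.insert v ((PySem.Dict.size d : Nat) : Int)) d).keys
      = PySem.Set.update d.keys s := by
  induction s with
  | nil => intro d _; simp [PySem.Set.update_nil]
  | cons v s ih =>
    intro d hnd
    rw [PySem.Set.update_cons]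
    by_cases hc : d.contains v = true
    · simp only [List.foldl_cons, if_pos hc]
      rw [ih d hnd, PySem.Set.add_of_mem ((PySem.Dict.contains_iff_mem_keys d v).mp hc)]
    · have hc' : d.contains v = false := by simpa using hc
      simp only [List.foldl_cons, if_neg hc]
      rw [ih _ (PySem.Dict.nodup_keys_insert d v _ hnd)]
      rw [PySem.Dict.keys_insert_of_not_contains d _ hc']
      rw [PySem.Set.add_of_not_mem (fun h => hc ((PySem.Dict.contains_iff_mem_keys d v).mpr h))]

theorem set_length_eq_card (l : List Int) : (PySem.Set.ofList l).length = l.toFinset.card := by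
  rw [← List.toFinset_card_of_nodup (PySem.Set.nodup_ofList l)]
  congr 1
  ext x
  simp [PySem.Set.mem_ofList]

theorem B_eq_card (list : List Int) : redefine_indices_alt list = (list.toFinset.card : Int) := by
  simp only [redefine_indices_alt]
  have hk := keys_rank_fold (PySem.List.sorted list (fun x => x)) PySem.Dict.empty (by simp [PySem.Dict.keys_empty])
  have hsize : ∀ d : PySem.Dict Int Int, PySem.Dict.size d = d.keys.length := by
    intro d; simp [PySem.Dict.size, PySem.Dict.keys]
  rw [hsize, hk]
  rw [PySem.Dict.keys_empty, PySem.Set.update_nil_left, set_length_eq_card]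
  rw [List.toFinset_eq_of_perm _ _ (PySem.List.sorted_perm list (fun x => x) false)]
def pvRanks (k : Int) (prev : Int) : List Int → List Int
  | [] => []
  | v :: vs => (if v ≠ prev then k + 1 else k) :: pvRanks (if v ≠ prev then k + 1 else k) v vs

theorem length_pvRanks (vs : List Int) : ∀ (k p : Int), (pvRanks k p vs).length = vs.length := by
  induction vs with
  | nil => intro k p; rfl
  | cons v vs ih => intro k p; simp [pvRanks, ih]

theorem le_of_mem_pvRanks (vs : List Int) : ∀ (k p x : Int), x ∈ pvRanks k p vs → k ≤ x := by
  induction vs with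
  | nil => intro k p x h; simp [pvRanks] at h
  | cons v vs ih =>
    intro k p x h
    simp only [pvRanks, List.mem_cons] at h
    rcases h with h | h
    · subst h; split <;> omega
    · have := ih _ _ _ h; split at this <;> omega

theorem card_pvRanks (vs : List Int) : ∀ (k p : Int), (p :: vs).Pairwise (· ≤ ·) →
    ((k :: pvRanks k p vs).toFinset).card = ((p :: vs).toFinset).card := by
  induction vs with
  | nil => intro k p _; simp [pvRanks]
  | cons v vs ih =>
    intro k p hp
    have hp' : (v :: vs).Pairwise (· ≤ ·) := hp.tail
    by_cases hv : v = p
    · subst hv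
      have h2 := ih k v hp'
      simp only [pvRanks, ne_eq]
      rw [if_neg (by simp)]
      rw [show (k :: k :: pvRanks k v vs).toFinset = (k :: pvRanks k v vs).toFinset by simp,
          show (v :: v :: vs).toFinset = (v :: vs).toFinset by simp]
      exact h2
    · have hlt : ∀ y ∈ v :: vs, p < y := by
        intro y hy
        have hle : p ≤ y := (List.pairwise_cons.mp hp).1 y hy
        rcases List.mem_cons.mp hy with rfl | hy'
        · omega
        · have : v ≤ y := (List.pairwise_cons.mp hp').1 y hy'
          have : p ≤ v := (List.pairwise_cons.mp hp).1 v (by simp)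
          omega
      have hpnot : p ∉ (v :: vs) := fun h => absurd (hlt p h) (lt_irrefl p)
      have hknot : k ∉ ((if v ≠ p then k + 1 else k) :: pvRanks (if v ≠ p then k + 1 else k) v vs) := by
        rw [if_pos hv]
        intro h
        rcases List.mem_cons.mp h with h | h
        · omega
        · have := le_of_mem_pvRanks vs _ _ _ h; omega
      simp only [pvRanks]
      rw [List.toFinset_cons, Finset.card_insert_of_notMem (by simpa using hknot)]
      rw [List.toFinset_cons (a := p), Finset.card_insert_of_notMem (by simpa using hpnot)]
      rw [if_pos hv]
      exact congrArg (· + 1) (ih (k+1) v hp')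
theorem pyRange_map_adjacent (q : List (Int × Int)) :
    (PySem.List.pyRange 1 (q.length : Int) 1).map
      (fun i => (PySem.List.pyGetD q (i - 1) ((0 : Int), (0 : Int)), PySem.List.pyGetD q i ((0 : Int), (0 : Int))))
      = q.zip q.tail := by
  refine List.ext_getElem ?_ ?_
  · simp [PySem.List.length_pyRange_one, List.length_zip, List.length_tail]
  · intro j h1 h2
    simp only [List.getElem_map, PySem.List.getElem_pyRange_one, List.getElem_zip]
    rw [List.length_map, PySem.List.length_pyRange_one] at h1
    have hj1 : j + 1 < q.length := by omega
    have hj0 : j < q.length := by omega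
    have e1 : PySem.List.pyGetD q (1 + (j : Int) - 1) ((0:Int),(0:Int)) = q[j] := by
      rw [show (1 + (j : Int) - 1) = ((j : Nat) : Int) by omega]
      simp [List.getD_eq_getElem?_getD, List.getElem?_eq_getElem hj0]
    have e2 : PySem.List.pyGetD q (1 + (j : Int)) ((0:Int),(0:Int)) = q[j + 1] := by
      rw [show (1 + (j : Int)) = ((j + 1 : Nat) : Int) by push_cast; ring,
          PySem.List.pyGetD_natCast, List.getD_eq_getElem?_getD, List.getElem?_eq_getElem hj1]
      rfl
    rw [e1, e2, List.getElem_tail]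
theorem zipfold_eq (rest : List (Int × Int)) : ∀ (p : Int × Int) (k0 : Int) (acc0 : List (Int × Int)),
    (((p :: rest).zip rest).foldl
      (fun (s : Int × List (Int × Int)) (pr : (Int × Int) × (Int × Int)) =>
        let k := if pr.2.2 ≠ pr.1.2 then s.1 + 1 else s.1
        (k, s.2 ++ [(pr.2.1, k)]))
      (k0, acc0)).2
    = acc0 ++ (rest.map Prod.fst).zip (pvRanks k0 p.2 (rest.map Prod.snd)) := by
  induction rest with
  | nil => intro p k0 acc0; simp [pvRanks]
  | cons r rs ih =>
    intro p k0 acc0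
    simp only [List.zip_cons_cons, List.foldl_cons, List.map_cons, pvRanks, List.zip_cons_cons]
    rw [ih r _ _]
    simp
theorem writes_length (ps : List (Int × Int)) : ∀ (xs : List Int),
    (ps.foldl (fun l pv => PySem.List.pySetD l pv.1 pv.2) xs).length = xs.length := by
  induction ps with
  | nil => intro xs; rfl
  | cons pv ps ih => intro xs; simp [List.foldl_cons, ih, PySem.List.length_pySetD]

theorem writes_getElem_eq (ps : List (Int × Int)) : ∀ (xs : List Int) (j : Nat),
    (∀ pv ∈ ps, 0 ≤ pv.1 ∧ pv.1 < (xs.length : Int)) →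
    ps.find? (fun pv => pv.1 == (j : Int)) = none →
    (ps.foldl (fun l pv => PySem.List.pySetD l pv.1 pv.2) xs)[j]? = xs[j]? := by
  induction ps with
  | nil => intro xs j _ _; rfl
  | cons pv ps ih =>
    intro xs j hr hf
    rw [List.find?_eq_none] at hf
    have hne : ¬ (pv.1 == (j : Int)) = true := hf pv (by simp)
    have hf' : ps.find? (fun pv => pv.1 == (j : Int)) = none :=
      List.find?_eq_none.mpr (fun q hq => hf q (by simp [hq]))
    have h0 : 0 ≤ pv.1 := (hr pv (by simp)).1
    simp only [List.foldl_cons]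
    rw [ih (PySem.List.pySetD xs pv.1 pv.2) j
        (by intro q hq; have := hr q (by simp [hq]); simpa [PySem.List.length_pySetD] using this) hf']
    rw [PySem.List.pySetD_of_nonneg xs pv.2 h0]
    rw [List.getElem?_set_ne]
    intro h
    apply hne
    simp [← h, Int.toNat_of_nonneg h0]

theorem writes_getElem_some (ps : List (Int × Int)) : ∀ (xs : List Int) (pv : Int × Int),
    pv ∈ ps → (ps.map Prod.fst).Nodup →
    (∀ pv ∈ ps, 0 ≤ pv.1 ∧ pv.1 < (xs.length : Int)) →
    (ps.foldl (fun l pv => PySem.List.pySetD l pv.1 pv.2) xs)[pv.1.toNat]? = some pv.2 := by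
  induction ps with
  | nil => intro xs pv h; simp at h
  | cons q ps ih =>
    intro xs pv hmem hnd hr
    have h0 : 0 ≤ q.1 := (hr q (by simp)).1
    have h1 : q.1 < (xs.length : Int) := (hr q (by simp)).2
    simp only [List.map_cons, List.nodup_cons] at hnd
    obtain ⟨hq1, hnd'⟩ := hnd
    have hr' : ∀ pv ∈ ps, 0 ≤ pv.1 ∧ pv.1 < ((PySem.List.pySetD xs q.1 q.2).length : Int) := by
      intro a ha; have := hr a (by simp [ha]); simpa [PySem.List.length_pySetD] using this
    rcases List.mem_cons.mp hmem with rfl | hmem'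
    · -- pv is the head; no later write touches its position
      simp only [List.foldl_cons]
      rw [writes_getElem_eq ps (PySem.List.pySetD xs pv.1 pv.2) pv.1.toNat hr'
          (List.find?_eq_none.mpr ?_)]
      · rw [PySem.List.pySetD_of_nonneg xs pv.2 h0]
        exact List.getElem?_set_self (by omega)
      · intro a ha hb
        apply hq1
        have : a.1 = (pv.1.toNat : Int) := by simpa using hb
        rw [Int.toNat_of_nonneg h0] at this
        exact List.mem_map.mpr ⟨a, ha, this⟩
    · simp only [List.foldl_cons]
      exact ih _ pv hmem' hnd' hr'

theorem writes_mem (ps : List (Int × Int)) (xs : List Int)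
    (hnd : (ps.map Prod.fst).Nodup)
    (hrange : ∀ pv ∈ ps, 0 ≤ pv.1 ∧ pv.1 < (xs.length : Int))
    (hcover : ∀ j : Nat, j < xs.length → (j : Int) ∈ ps.map Prod.fst) :
    ∀ x, x ∈ ps.foldl (fun l pv => PySem.List.pySetD l pv.1 pv.2) xs ↔ x ∈ ps.map Prod.snd := by
  intro x
  constructor
  · intro hx
    obtain ⟨j, hj, hjx⟩ := List.getElem_of_mem hx
    have hj' : j < xs.length := by rw [← writes_length ps xs]; exact hj
    obtain ⟨pv, hpv, hpv1⟩ := List.mem_map.mp (hcover j hj')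
    have := writes_getElem_some ps xs pv hpv hnd hrange
    have ht : pv.1.toNat = j := by omega
    rw [ht] at this
    rw [List.getElem?_eq_getElem hj, hjx] at this
    exact List.mem_map.mpr ⟨pv, hpv, by simp at this; omega⟩
  · intro hx
    obtain ⟨pv, hpv, hpv2⟩ := List.mem_map.mp hx
    have := writes_getElem_some ps xs pv hpv hnd hrange
    rw [hpv2] at this
    exact List.mem_of_getElem? this

theorem A_eq_card (list : List Int) (hne : list ≠ []) :
    redefine_indices list = (list.toFinset.card : Int) := by
  have hd_items :
      ((PySem.List.pyRange 0 (PySem.List.len list) 1).foldl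
        (fun (d : PySem.Dict Int Int) i => d.insert i (PySem.List.pyGetD list i 0)) PySem.Dict.empty).items
      = PySem.List.enumerate list := by
    rw [PySem.Dict.items_foldl_insert_fresh (PySem.List.pyRange 0 (PySem.List.len list) 1)
        (fun i => i) (fun i => PySem.List.pyGetD list i 0) PySem.Dict.empty
        (fun a _ => PySem.Dict.contains_empty a)
        (by simpa using PySem.List.nodup_pyRange_one 0 (PySem.List.len list))]
    rw [PySem.List.enumerate_eq_map_pyRange list 0]
    rfl
  simp only [redefine_indices]
  rw [hd_items]
  set q := PySem.List.sorted (PySem.List.enumerate list) (fun x => x.2) with hq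
  have hql : q.length = list.length := by
    rw [hq, PySem.List.length_sorted, PySem.List.length_enumerate]
  have hqne : q ≠ [] := by
    intro h; apply hne
    have := congrArg List.length h
    rw [hql] at this; simpa using List.length_eq_zero_iff.mp this
  obtain ⟨p, rest, hcons⟩ := List.exists_cons_of_ne_nil hqne
  -- the sorted (index, value) pairs: a permutation of enumerate list
  have hperm : q.Perm (PySem.List.enumerate list) := PySem.List.sorted_perm _ _ _
  have hfst_perm : (q.map Prod.fst).Perm (PySem.List.pyRange 0 (list.length : Int) 1) := by
    have h1 := hperm.map (fun x : Int × Int => x.1)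
    rw [PySem.List.map_fst_enumerate, zero_add] at h1
    exact h1
  have hkn : (List.foldl
      (fun (s : Int × List (Int × Int)) (i : Int) =>
        (if (PySem.List.pyGetD q i (0, 0)).2 ≠ (PySem.List.pyGetD q (i - 1) (0, 0)).2 then s.1 + 1 else s.1,
         s.2 ++ [((PySem.List.pyGetD q i (0, 0)).1,
           if (PySem.List.pyGetD q i (0, 0)).2 ≠ (PySem.List.pyGetD q (i - 1) (0, 0)).2 then s.1 + 1 else s.1)]))
      (0, [((PySem.List.pyGetD q 0 (0, 0)).1, 0)]) (PySem.List.pyRange 1 (PySem.List.len list))).2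
    = (p.1, 0) :: (rest.map Prod.fst).zip (pvRanks 0 p.2 (rest.map Prod.snd)) := by
    rw [show PySem.List.len list = (q.length : Int) by rw [PySem.List.len_eq, hql]]
    have hstep : List.foldl
        (fun (s : Int × List (Int × Int)) (i : Int) =>
          (if (PySem.List.pyGetD q i (0, 0)).2 ≠ (PySem.List.pyGetD q (i - 1) (0, 0)).2 then s.1 + 1 else s.1,
           s.2 ++ [((PySem.List.pyGetD q i (0, 0)).1,
             if (PySem.List.pyGetD q i (0, 0)).2 ≠ (PySem.List.pyGetD q (i - 1) (0, 0)).2 then s.1 + 1 else s.1)]))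
        (0, [((PySem.List.pyGetD q 0 (0, 0)).1, 0)]) (PySem.List.pyRange 1 (q.length : Int))
      = List.foldl
        (fun (s : Int × List (Int × Int)) (pr : (Int × Int) × (Int × Int)) =>
          let k := if pr.2.2 ≠ pr.1.2 then s.1 + 1 else s.1
          (k, s.2 ++ [(pr.2.1, k)]))
        (0, [((PySem.List.pyGetD q 0 (0, 0)).1, 0)]) (q.zip q.tail) := by
      conv_rhs => rw [← pyRange_map_adjacent q, List.foldl_map]
    rw [hstep, hcons]
    simp only [List.tail_cons, PySem.List.pyGetD_zero_cons]
    rw [zipfold_eq rest p 0 [(p.1, 0)]]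
    simp
  rw [hkn]
  set nova := (p.1, 0) :: (rest.map Prod.fst).zip (pvRanks 0 p.2 (rest.map Prod.snd)) with hnova
  have hlenzip : (rest.map Prod.fst).length = (pvRanks 0 p.2 (rest.map Prod.snd)).length := by
    rw [List.length_map, length_pvRanks, List.length_map]
  have hnova_len : nova.length = list.length := by
    rw [hnova, List.length_cons, List.length_zip, ← hlenzip, min_self, List.length_map]
    rw [← hql, hcons, List.length_cons]
  have hnovafst : nova.map Prod.fst = q.map Prod.fst := by
    rw [hnova, hcons, List.map_cons, List.map_cons, List.map_fst_zip (le_of_eq hlenzip)]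
  have hnovasnd : nova.map Prod.snd = 0 :: pvRanks 0 p.2 (rest.map Prod.snd) := by
    rw [hnova, List.map_cons, List.map_snd_zip (le_of_eq hlenzip.symm)]
  have hnew : List.foldl
      (fun (l : List Int) (i : Int) =>
        PySem.List.pySetD l (PySem.List.pyGetD nova i (0, 0)).1 (PySem.List.pyGetD nova i (0, 0)).2)
      list (PySem.List.pyRange 0 (PySem.List.len list))
    = List.foldl (fun l pv => PySem.List.pySetD l pv.1 pv.2) list nova := by
    rw [show PySem.List.len list = PySem.List.len nova by
      rw [PySem.List.len_eq, PySem.List.len_eq, hnova_len]]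
    conv_rhs => rw [← PySem.List.map_pyGetD_pyRange_zero nova ((0 : Int), (0 : Int)), List.foldl_map]
  rw [hnew, PySem.Dict.keys_counter, PySem.List.len_eq, set_length_eq_card]
  -- membership facts for the write-back loop
  have hnd : (nova.map Prod.fst).Nodup := by
    rw [hnovafst]
    exact hfst_perm.symm.nodup (PySem.List.nodup_pyRange_one 0 (list.length : Int))
  have hrange : ∀ pv ∈ nova, 0 ≤ pv.1 ∧ pv.1 < (list.length : Int) := by
    intro pv hpv
    have h1 : pv.1 ∈ nova.map Prod.fst := List.mem_map_of_mem hpv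
    rw [hnovafst] at h1
    have h2 := hfst_perm.mem_iff.mp h1
    exact ⟨(PySem.List.mem_pyRange_one.mp h2).1, (PySem.List.mem_pyRange_one.mp h2).2⟩
  have hcover : ∀ j : Nat, j < list.length → (j : Int) ∈ nova.map Prod.fst := by
    intro j hj
    rw [hnovafst]
    exact hfst_perm.symm.mem_iff.mp (PySem.List.mem_pyRange_one.mpr ⟨by omega, by omega⟩)
  have hTF : (List.foldl (fun l pv => PySem.List.pySetD l pv.1 pv.2) list nova).toFinset
      = (nova.map Prod.snd).toFinset := by
    ext x
    simp only [List.mem_toFinset]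
    exact writes_mem nova list hnd hrange hcover x
  rw [hTF, hnovasnd]
  have hpair : (p.2 :: rest.map Prod.snd).Pairwise (· ≤ ·) := by
    have h1 := PySem.List.sorted_map_key_pairwise (PySem.List.enumerate list) (fun x : Int × Int => x.2)
    rw [← hq, hcons, List.map_cons] at h1
    exact h1
  rw [card_pvRanks (rest.map Prod.snd) 0 p.2 hpair]
  have hsnd_perm : ((p.2 :: rest.map Prod.snd) : List Int).Perm list := by
    have h1 := hperm.map (fun x : Int × Int => x.2)
    rw [PySem.List.map_snd_enumerate, hcons, List.map_cons] at h1
    exact h1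
  rw [List.toFinset_eq_of_perm _ _ hsnd_perm]

-- ===== VERDICT (by name: the statement is the Claim_ definition above) =====
theorem redefine_indices_spec : Claim_equal_redefine_indices := by
  intro list _ hpre
  unfold Spec_redefine_indices
  rw [A_eq_card list hpre, B_eq_card list]
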